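-- pv_equiv track=rewrite | github.com/jsh/lifts | src/streaks/streaks.py | decompose_into_streaks
-- ===== SOURCE A (Python) =====
-- from operator import gt, lt
-- from typing import List
--
-- def decompose_into_streaks(
--     seq: List[int], winning: bool = True
-- ) -> List[List[int]]:
--     """
--     Decompose a sequence into its component streaks.
--
--     A streak is a sequence of numbers such that the first number is
--     the smallest (winning) or largest (losing).
--     The output is a list of such streaks.
--     If winning is False, the sequence will be decomposed into losing streaks,
--     i.e., the first number will be the largest. (Default is True, as in English.
--     "He's on a streak." is normally taken to mean "He's on a winning streak.")
--
--     Args: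
--         seq (list[int]): The sequence to decompose into streaks
--
--     Returns:
--         list[list[int]]: A list of streaks
--     """
--
--     if winning:
--         cmp = gt
--     else:
--         cmp = lt
--
--     if not seq:
--         return []
--
--     streaks = []
--     current_streak = [seq[0]]
--     current_streak_start = current_streak[0]
--
--     for i in range(1, len(seq)):
--         next_ = seq[i]
--         if cmp(next_, current_streak_start):
--             current_streak.append(next_)
--         else:
--             streaks.append(current_streak)
--             current_streak = [next_]
--             current_streak_start = next_
--
--     streaks.append(current_streak)
--     return streaks
-- ===== SOURCE B (Python) =====
-- def decompose_into_streaks(seq, winning=True):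
--     out = []
--     i, n = 0, len(seq)
--     while i < n:
--         head = seq[i]
--         j = i + 1
--         while j < n and (head < seq[j] if winning else seq[j] < head):
--             j += 1
--         out.append(seq[i:j])
--         i = j
--     return out
-- ===== Notes on version B (the rewrite author's own statement) =====
-- stated objective: alternative
-- what changed: B replaces A's accumulator fold (current streak list + start value carried through one element loop, flushed at the end) by a two-pointer scan: for each position it finds the streak's end index and emits the slice seq[i:j] directly, with no running streak state or final flush.
import Mathlib
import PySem

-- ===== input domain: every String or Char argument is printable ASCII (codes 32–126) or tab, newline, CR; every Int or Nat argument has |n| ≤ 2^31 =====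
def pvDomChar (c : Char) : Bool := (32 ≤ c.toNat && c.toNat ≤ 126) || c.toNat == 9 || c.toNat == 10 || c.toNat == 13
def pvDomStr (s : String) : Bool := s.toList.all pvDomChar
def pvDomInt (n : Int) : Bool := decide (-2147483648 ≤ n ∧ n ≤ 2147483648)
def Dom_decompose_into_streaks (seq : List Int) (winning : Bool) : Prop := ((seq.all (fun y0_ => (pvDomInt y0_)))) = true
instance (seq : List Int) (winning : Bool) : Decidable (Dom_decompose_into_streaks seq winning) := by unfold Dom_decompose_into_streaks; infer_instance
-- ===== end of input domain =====

-- B replaces A's accumulator fold by a two-pointer scan emitting slices; same O(n) cost (objective: alternative).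

-- ===== PORT A =====
-- one loop step of A: state = (streaks, current_streak, current_streak_start)
def pvStepA (winning : Bool) (st : List (List Int) × List Int × Int) (next_ : Int) :
    List (List Int) × List Int × Int :=
  if (if winning then next_ > st.2.2 else next_ < st.2.2) then
    (st.1, st.2.1 ++ [next_], st.2.2)
  else
    (st.1 ++ [st.2.1], [next_], next_)

def decompose_into_streaks (seq : List Int) (winning : Bool) : List (List Int) :=
  match seq with
  | [] => []
  | s0 :: _ =>
    let fin := (PySem.List.pyRange 1 (seq.length : Int) 1).foldl
      (fun st i => pvStepA winning st (PySem.List.pyGetD seq i 0)) ([], [s0], s0)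
    fin.1 ++ [fin.2.1]

-- ===== PORT B =====
-- `head < seq[j] if winning else seq[j] < head`
def pvBeats (winning : Bool) (head x : Int) : Bool :=
  if winning then head < x else x < head

-- inner while loop of B: advance j while the element beats the streak head
def pvScanJ (winning : Bool) (seq : List Int) (head : Int) (j : Nat) : Nat :=
  if h : j < seq.length then
    if pvBeats winning head seq[j] then pvScanJ winning seq head (j + 1) else j
  else j
termination_by seq.length - j

theorem pvScanJ_ge (winning : Bool) (seq : List Int) (head : Int) (j : Nat) :
    j ≤ pvScanJ winning seq head j := by
  unfold pvScanJ
  split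
  · split
    · have := pvScanJ_ge winning seq head (j + 1); omega
    · exact le_refl j
  · exact le_refl j
termination_by seq.length - j

-- outer while loop of B: emit slice seq[i:j] and continue from j
def pvGoB (winning : Bool) (seq : List Int) (i : Nat) : List (List Int) :=
  if h : i < seq.length then
    -- j := end of the streak starting at i
    PySem.List.slice seq (some (i : Int)) (some ((pvScanJ winning seq seq[i] (i + 1) : Nat) : Int))
      :: pvGoB winning seq (pvScanJ winning seq seq[i] (i + 1))
  else []
termination_by seq.length - i
decreasing_by have := pvScanJ_ge winning seq seq[i] (i + 1); omega

def decompose_into_streaks_alt (seq : List Int) (winning : Bool) : List (List Int) :=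
  pvGoB winning seq 0

-- ===== PRECONDITION & SPEC =====
def Spec_decompose_into_streaks (seq : List Int) (winning : Bool) (out : List (List Int)) : Prop := out = decompose_into_streaks_alt seq winning
instance (seq : List Int) (winning : Bool) (out : List (List Int)) : Decidable (Spec_decompose_into_streaks seq winning out) := by unfold Spec_decompose_into_streaks; infer_instance

-- ===== CLAIM (what is proved, stated in full; the proofs are below) =====
def Claim_equal_decompose_into_streaks : Prop := ∀ (seq : List Int) (winning : Bool), Dom_decompose_into_streaks seq winning → Spec_decompose_into_streaks seq winning (decompose_into_streaks seq winning)

-- ===== LEMMAS AND PROOFS =====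

-- reference function: streaks by span recursion
def pvS (w : Bool) : List Int → List (List Int)
  | [] => []
  | a :: r => (a :: r.takeWhile (pvBeats w a)) :: pvS w (r.dropWhile (pvBeats w a))
termination_by l => l.length
decreasing_by simpa using Nat.lt_succ_of_le (List.length_dropWhile_le _ _)

theorem pv_take_takeWhile {p : Int → Bool} (r : List Int) :
    r.take (r.takeWhile p).length = r.takeWhile p := by
  induction r with
  | nil => rfl
  | cons a r ih =>
    by_cases h : p a = true
    · simp [h, ih]
    · simp [h]

theorem pv_drop_takeWhile {p : Int → Bool} (r : List Int) :
    r.drop (r.takeWhile p).length = r.dropWhile p := by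
  induction r with
  | nil => rfl
  | cons a r ih =>
    by_cases h : p a = true
    · simp [h, ih]
    · simp [h]

theorem pvS_nil (w : Bool) : pvS w [] = [] := by
  rw [pvS.eq_def]

theorem pvS_cons (w : Bool) (a : Int) (r : List Int) :
    pvS w (a :: r) = (a :: r.takeWhile (pvBeats w a)) :: pvS w (r.dropWhile (pvBeats w a)) := by
  rw [pvS.eq_def]

theorem pvScanJ_eq (w : Bool) (seq : List Int) (head : Int) (j : Nat) :
    pvScanJ w seq head j = j + ((seq.drop j).takeWhile (pvBeats w head)).length := by
  unfold pvScanJ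
  split
  · rename_i h
    have htw : (seq.drop j).takeWhile (pvBeats w head)
        = if pvBeats w head seq[j] then seq[j] :: (seq.drop (j + 1)).takeWhile (pvBeats w head)
          else [] := by
      rw [List.drop_eq_getElem_cons h, List.takeWhile_cons]
    split
    · rename_i hb
      rw [pvScanJ_eq w seq head (j + 1), htw, if_pos hb, List.length_cons]
      omega
    · rename_i hb
      rw [htw, if_neg hb, List.length_nil]
      omega
  · rename_i h
    rw [List.drop_eq_nil_of_le (by omega)]
    simp
termination_by seq.length - j

theorem pvGoB_eq (w : Bool) (seq : List Int) (i : Nat) :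
    pvGoB w seq i = pvS w (seq.drop i) := by
  unfold pvGoB
  split
  · rename_i h
    have hj := pvScanJ_eq w seq seq[i] (i + 1)
    have h1 : PySem.List.slice seq (some (i : Int))
        (some ((pvScanJ w seq seq[i] (i + 1) : Nat) : Int))
        = seq[i] :: (seq.drop (i + 1)).takeWhile (pvBeats w seq[i]) := by
      rw [PySem.List.slice_natCast, hj]
      rw [show i + 1 + ((seq.drop (i + 1)).takeWhile (pvBeats w seq[i])).length - i
            = ((seq.drop (i + 1)).takeWhile (pvBeats w seq[i])).length + 1 by omega]
      rw [List.drop_eq_getElem_cons h, List.take_succ_cons, pv_take_takeWhile]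
    have h2 : pvGoB w seq (pvScanJ w seq seq[i] (i + 1))
        = pvS w ((seq.drop (i + 1)).dropWhile (pvBeats w seq[i])) := by
      rw [pvGoB_eq w seq (pvScanJ w seq seq[i] (i + 1)), hj,
          ← pv_drop_takeWhile (seq.drop (i + 1)), List.drop_drop]
    rw [h1, h2, List.drop_eq_getElem_cons h, pvS_cons]
  · rename_i h
    rw [List.drop_eq_nil_of_le (by omega), pvS_nil]
termination_by seq.length - i
decreasing_by have := pvScanJ_ge w seq seq[i] (i + 1); omega

-- A's fold, finished by the final flush, computes pvS
theorem pvFoldA_eq (w : Bool) (l : List Int) :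
    ∀ (acc : List (List Int)) (cur : List Int) (start : Int),
    (l.foldl (pvStepA w) (acc, cur, start)).1 ++ [(l.foldl (pvStepA w) (acc, cur, start)).2.1]
      = acc ++ ((cur ++ l.takeWhile (pvBeats w start)) :: pvS w (l.dropWhile (pvBeats w start))) := by
  induction l with
  | nil => intro acc cur start; simp [pvS_nil]
  | cons x xs ih =>
    intro acc cur start
    by_cases hb : pvBeats w start x = true
    · have hstep : pvStepA w (acc, cur, start) x = (acc, cur ++ [x], start) := by
        simp only [pvStepA, pvBeats] at hb ⊢
        cases w <;> simp_all
      rw [List.foldl_cons, hstep, ih, List.takeWhile_cons, if_pos hb,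
          List.dropWhile_cons_of_pos hb]
      simp
    · have hstep : pvStepA w (acc, cur, start) x = (acc ++ [cur], [x], x) := by
        simp only [pvStepA, pvBeats] at hb ⊢
        cases w <;> simp_all
      rw [List.foldl_cons, hstep, ih, List.takeWhile_cons, if_neg hb,
          List.dropWhile_cons_of_neg hb, pvS_cons]
      simp

theorem pvA_eq_pvS (seq : List Int) (w : Bool) :
    decompose_into_streaks seq w = pvS w seq := by
  cases seq with
  | nil => rw [pvS_nil]; rfl
  | cons s0 rest =>
    simp only [decompose_into_streaks]
    rw [PySem.List.foldl_pyRange_pyGetD' (s0 :: rest) 0 (pvStepA w) ([], [s0], s0) (by omega : (0:Int) ≤ 1)]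
    rw [show ((1 : Int).toNat) = 1 from rfl, show (s0 :: rest).drop 1 = rest from rfl]
    rw [pvFoldA_eq w rest [] [s0] s0, pvS_cons]
    simp

-- ===== VERDICT (by name: the statement is the Claim_ definition above) =====
theorem decompose_into_streaks_spec : Claim_equal_decompose_into_streaks := by
  intro seq winning _
  unfold Spec_decompose_into_streaks decompose_into_streaks_alt
  rw [pvA_eq_pvS, pvGoB_eq, List.drop_zero]
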